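-- pv_equiv track=rewrite | github.com/sigurdvaa/adventofcode | 2015/17-No-Such-Thing-as-Too-Much.py | num_combinations_fit_min
-- ===== SOURCE A (Python) =====
-- def num_combinations_fit_min(combinations: list, liters: int):
--     num = 0
--     min_size = -1
--     for combination in combinations:
--         if sum(combination) == liters:
--             if min_size == -1:
--                 min_size = len(combination)
--                 num = 1
--             else:
--                 if min_size > len(combination):
--                     min_size = len(combination)
--                     num = 0
--                 elif min_size == len(combination):
--                     num += 1
--
--     return num
-- ===== SOURCE B (Python) =====
-- def num_combinations_fit_min(combinations: list, liters: int):
--     lengths = [len(c) for c in combinations if sum(c) == liters]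
--     if not lengths:
--         return 0
--     m = min(lengths)
--     return lengths.count(m)
-- ===== Notes on version B (the rewrite author's own statement) =====
-- stated objective: simpler
-- what changed: Replaces A's stateful single pass (running min plus reset-on-smaller counter) with a collect-then-reduce pipeline: materialize the matching lengths, then take min and count over that list; this also fixes A's reset-to-0 off-by-one.
-- intended difference: On inputs where the first combination summing to liters is not of minimal matching length, A returns one less than the number of minimal matches (it resets its counter to 0 instead of 1 on a new minimum), while B returns the true count of minimal-size matches, which is the intended value for this AoC puzzle. — e.g. on num_combinations_fit_min([[1, 1], [2]], 2): A returns 0, B returns 1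
import Mathlib
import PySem

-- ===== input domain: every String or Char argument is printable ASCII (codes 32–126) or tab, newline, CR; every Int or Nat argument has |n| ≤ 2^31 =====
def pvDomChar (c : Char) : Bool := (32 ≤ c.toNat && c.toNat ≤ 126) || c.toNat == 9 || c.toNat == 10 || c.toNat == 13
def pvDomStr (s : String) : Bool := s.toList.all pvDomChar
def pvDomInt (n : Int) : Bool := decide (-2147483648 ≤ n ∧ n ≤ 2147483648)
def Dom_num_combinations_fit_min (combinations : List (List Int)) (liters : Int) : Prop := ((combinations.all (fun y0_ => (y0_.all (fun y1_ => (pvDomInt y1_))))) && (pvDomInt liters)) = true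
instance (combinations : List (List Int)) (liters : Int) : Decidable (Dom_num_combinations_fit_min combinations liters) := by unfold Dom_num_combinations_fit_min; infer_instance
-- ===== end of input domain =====

-- B replaces A's stateful single pass (running min with a reset-on-smaller counter) by a
-- collect-then-reduce pipeline (filter+map the matching lengths, then min, then count);
-- this also fixes A's off-by-one (A resets its counter to 0 instead of 1 on a new minimum).

-- ===== PORT A =====
def num_combinations_fit_min (combinations : List (List Int)) (liters : Int) : Int :=
  (combinations.foldl
    (fun (s : Int × Int) (combination : List Int) =>
      if combination.sum == liters then
        if s.2 == -1 then (1, (combination.length : Int))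
        else
          if s.2 > (combination.length : Int) then (0, (combination.length : Int))
          else if s.2 == (combination.length : Int) then (s.1 + 1, s.2)
          else s
      else s)
    (0, -1)).1

-- ===== PORT B =====
def num_combinations_fit_min_alt (combinations : List (List Int)) (liters : Int) : Int :=
  let lengths : List Int :=
    (combinations.filter (fun c => c.sum == liters)).map (fun c => (c.length : Int))
  match PySem.List.min? lengths (fun x => x) with
  | none => 0
  | some m => (PySem.List.count lengths m : Int)

-- ===== PRECONDITION & SPEC =====
-- On inputs where the first combination summing to liters is not of minimal matching length,
-- A returns one less than the number of minimal-length matches (it resets its counter to 0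
-- instead of 1 on finding a new minimum), while B returns the true count of minimal-size
-- matches, which is the intended value.
def D_num_combinations_fit_min (combinations : List (List Int)) (liters : Int) : Prop :=
  ∃ i < combinations.length, ∃ j < combinations.length,
    i < j ∧
    (∀ k < i, (combinations.getD k []).sum ≠ liters) ∧
    (combinations.getD i []).sum = liters ∧
    (combinations.getD j []).sum = liters ∧
    (combinations.getD j []).length < (combinations.getD i []).length

instance (combinations : List (List Int)) (liters : Int) : Decidable (D_num_combinations_fit_min combinations liters) := by unfold D_num_combinations_fit_min; infer_instance

def Spec_num_combinations_fit_min (combinations : List (List Int)) (liters : Int) (out : Int) : Prop := ¬ D_num_combinations_fit_min combinations liters → out = num_combinations_fit_min_alt combinations liters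
instance (combinations : List (List Int)) (liters : Int) (out : Int) : Decidable (Spec_num_combinations_fit_min combinations liters out) := by unfold Spec_num_combinations_fit_min; infer_instance

def pvDiffWitness_num_combinations_fit_min : List (List Int) × Int := ([[1, 1], [2]], 2)
def pvDiffWitnessOut_num_combinations_fit_min : Int × Int := (0, 1)

-- ===== CLAIM (what is proved, stated in full; the proofs are below) =====
def Claim_unchanged_num_combinations_fit_min : Prop := ∀ (combinations : List (List Int)) (liters : Int), Dom_num_combinations_fit_min combinations liters → Spec_num_combinations_fit_min combinations liters (num_combinations_fit_min combinations liters)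
def Claim_changed_num_combinations_fit_min : Prop := Dom_num_combinations_fit_min (pvDiffWitness_num_combinations_fit_min.1) (pvDiffWitness_num_combinations_fit_min.2) ∧ D_num_combinations_fit_min (pvDiffWitness_num_combinations_fit_min.1) (pvDiffWitness_num_combinations_fit_min.2) ∧ num_combinations_fit_min (pvDiffWitness_num_combinations_fit_min.1) (pvDiffWitness_num_combinations_fit_min.2) = pvDiffWitnessOut_num_combinations_fit_min.1 ∧ num_combinations_fit_min_alt (pvDiffWitness_num_combinations_fit_min.1) (pvDiffWitness_num_combinations_fit_min.2) = pvDiffWitnessOut_num_combinations_fit_min.2 ∧ pvDiffWitnessOut_num_combinations_fit_min.1 ≠ pvDiffWitnessOut_num_combinations_fit_min.2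
def Claim_exact_num_combinations_fit_min : Prop := ∀ (combinations : List (List Int)) (liters : Int), Dom_num_combinations_fit_min combinations liters → D_num_combinations_fit_min combinations liters → num_combinations_fit_min combinations liters ≠ num_combinations_fit_min_alt combinations liters

-- ===== LEMMAS AND PROOFS =====

-- D_ shifts across a non-matching head.
theorem D_cons_not (c : List Int) (t : List (List Int)) (liters : Int)
    (h : c.sum ≠ liters) :
    D_num_combinations_fit_min (c :: t) liters ↔ D_num_combinations_fit_min t liters := by
  unfold D_num_combinations_fit_min
  constructor
  · rintro ⟨i, hi, j, hj, hij, hfirst, hPi, hPj, hlen⟩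
    have hi0 : i ≠ 0 := by
      intro h0; subst h0; exact h hPi
    refine ⟨i - 1, by simp at hi; omega, j - 1, by simp at hj; omega, by omega, ?_, ?_, ?_, ?_⟩
    · intro k hk
      have := hfirst (k + 1) (by omega)
      simpa using this
    · have : (c :: t).getD i [] = t.getD (i - 1) [] := by
        obtain ⟨i', rfl⟩ : ∃ i', i = i' + 1 := ⟨i - 1, by omega⟩
        simp
      rwa [this] at hPi
    · have : (c :: t).getD j [] = t.getD (j - 1) [] := by
        obtain ⟨j', rfl⟩ : ∃ j', j = j' + 1 := ⟨j - 1, by omega⟩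
        simp
      rwa [this] at hPj
    · have h1 : (c :: t).getD i [] = t.getD (i - 1) [] := by
        obtain ⟨i', rfl⟩ : ∃ i', i = i' + 1 := ⟨i - 1, by omega⟩
        simp
      have h2 : (c :: t).getD j [] = t.getD (j - 1) [] := by
        obtain ⟨j', rfl⟩ : ∃ j', j = j' + 1 := ⟨j - 1, by omega⟩
        simp
      rw [h1, h2] at hlen; exact hlen
  · rintro ⟨i, hi, j, hj, hij, hfirst, hPi, hPj, hlen⟩
    refine ⟨i + 1, by simp; omega, j + 1, by simp; omega, by omega, ?_, by simpa using hPi,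
      by simpa using hPj, by simpa using hlen⟩
    intro k hk
    match k with
    | 0 => simpa using h
    | k' + 1 =>
      have := hfirst k' (by omega)
      simpa using this

-- D_ as a statement about the list of matching lengths.
theorem D_iff (combinations : List (List Int)) (liters : Int) :
    D_num_combinations_fit_min combinations liters ↔
      (∃ y ∈ ((combinations.filter (fun c => c.sum == liters)).map (fun c => (c.length : Int))).tail,
        y < ((combinations.filter (fun c => c.sum == liters)).map (fun c => (c.length : Int))).headD 0) := by
  induction combinations with
  | nil => unfold D_num_combinations_fit_min; simp
  | cons c t ih =>
    by_cases hP : c.sum = liters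
    · have hfc : (c :: t).filter (fun c => c.sum == liters)
          = c :: t.filter (fun c => c.sum == liters) := by
        simp [List.filter_cons, hP]
      rw [hfc]
      constructor
      · rintro ⟨i, hi, j, hj, hij, hfirst, hPi, hPj, hlen⟩
        have hi0 : i = 0 := by
          by_contra h0
          exact hfirst 0 (by omega) (by simpa using hP)
        subst hi0
        simp only [List.getD_cons_zero] at hPi hlen
        obtain ⟨j', rfl⟩ : ∃ j', j = j' + 1 := ⟨j - 1, by omega⟩
        simp only [List.getD_cons_succ] at hPj hlen
        have hj' : j' < t.length := by simp at hj; omega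
        rw [List.getD_eq_getElem _ _ hj'] at hPj hlen
        refine ⟨(t[j'].length : Int), ?_, ?_⟩
        · simp only [List.map_cons, List.tail_cons]
          exact List.mem_map.mpr ⟨t[j'], List.mem_filter.mpr ⟨List.getElem_mem hj', by simpa using hPj⟩, rfl⟩
        · simpa using hlen
      · rintro ⟨y, hy, hlt⟩
        simp only [List.map_cons, List.tail_cons, List.headD_cons] at hy hlt
        obtain ⟨d, hd, rfl⟩ := List.mem_map.mp hy
        obtain ⟨hdt, hPd⟩ := List.mem_filter.mp hd
        obtain ⟨j', hj', rfl⟩ := List.mem_iff_getElem.mp hdt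
        refine ⟨0, by simp, j' + 1, by simp; omega, by omega, by omega, by simpa using hP,
          ?_, ?_⟩
        · simp only [List.getD_cons_succ]
          rw [List.getD_eq_getElem _ _ hj']
          simpa using hPd
        · simp only [List.getD_cons_zero, List.getD_cons_succ]
          rw [List.getD_eq_getElem _ _ hj']
          exact_mod_cast hlt
    · have hfc : (c :: t).filter (fun c => c.sum == liters)
          = t.filter (fun c => c.sum == liters) := by
        simp [List.filter_cons, hP]
      rw [hfc, D_cons_not c t liters hP, ih]

-- A's loop body restricted to the matching lengths (what the loop does on a match).
def pvStepA (s : Int × Int) (x : Int) : Int × Int :=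
  if s.2 == -1 then (1, x)
  else
    if s.2 > x then (0, x)
    else if s.2 == x then (s.1 + 1, s.2)
    else s

-- A's fold over the combinations equals the pvStepA fold over the matching lengths.
theorem foldA_filter (liters : Int) (l : List (List Int)) (s : Int × Int) :
    l.foldl
      (fun (s : Int × Int) (combination : List Int) =>
        if combination.sum == liters then
          if s.2 == -1 then (1, (combination.length : Int))
          else
            if s.2 > (combination.length : Int) then (0, (combination.length : Int))
            else if s.2 == (combination.length : Int) then (s.1 + 1, s.2)
            else s
        else s) s
    = ((l.filter (fun c => c.sum == liters)).map (fun c => (c.length : Int))).foldl pvStepA s := by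
  induction l generalizing s with
  | nil => rfl
  | cons c t ih =>
    rw [List.foldl_cons, ih]
    by_cases h : (c.sum == liters) = true
    · simp [List.filter_cons, h, pvStepA]
    · simp [List.filter_cons, h]

-- Invariant for A's loop after the first match: the result is the running minimum together
-- with the count of that minimum, short by one whenever the minimum strictly dropped.
theorem foldA_char (L : List Int) (num ms : Int) (hL : ∀ y ∈ L, 0 ≤ y) (hms : 0 ≤ ms) :
    L.foldl pvStepA (num, ms)
      = (if L.foldl min ms < ms then (L.count (L.foldl min ms) : Int) - 1
         else num + (L.count ms : Int), L.foldl min ms) := by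
  induction L generalizing num ms with
  | nil => simp
  | cons x t ih =>
    have hx : 0 ≤ x := hL x (by simp)
    have ht : ∀ y ∈ t, 0 ≤ y := fun y hy => hL y (by simp [hy])
    have hne : (ms == -1) = false := by simp; omega
    rcases lt_trichotomy x ms with hlt | heq | hgt
    · -- ms > x : reset to (0, x)
      have hstep : pvStepA (num, ms) x = (0, x) := by
        simp [pvStepA, hne]; omega
      have hmin : min ms x = x := by omega
      rw [List.foldl_cons, hstep, ih 0 x ht hx]
      have hle := (PySem.List.foldl_min_le t x).1
      by_cases hc : t.foldl min x < x
      · have hne2 : x ≠ t.foldl min x := by omega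
        simp [List.foldl_cons, hmin, hc, show t.foldl min x < ms by omega,
          List.count_cons, hne2]
      · have heq2 : t.foldl min x = x := by omega
        simp [List.foldl_cons, hmin, hc, heq2, show x < ms from hlt, List.count_cons]
    · -- ms == x : increment
      have hstep : pvStepA (num, ms) x = (num + 1, ms) := by
        simp [pvStepA, hne, heq]
      have hmin : min ms x = ms := by omega
      rw [List.foldl_cons, hstep, ih (num + 1) ms ht hms]
      by_cases hc : t.foldl min ms < ms
      · have hne2 : x ≠ t.foldl min ms := by omega
        simp [List.foldl_cons, hmin, hc, List.count_cons, hne2]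
      · simp [List.foldl_cons, hmin, hc, List.count_cons, heq]
        omega
    · -- ms < x : skip
      have hstep : pvStepA (num, ms) x = (num, ms) := by
        simp [pvStepA, hne, show ¬ x < ms by omega, show ¬ ms = x by omega]
      have hmin : min ms x = ms := by omega
      rw [List.foldl_cons, hstep, ih num ms ht hms]
      have hle := (PySem.List.foldl_min_le t ms).1
      by_cases hc : t.foldl min ms < ms
      · have hne2 : x ≠ t.foldl min ms := by omega
        simp [List.foldl_cons, hmin, hc, List.count_cons, hne2]
      · have hne2 : x ≠ ms := by omega
        simp [List.foldl_cons, hmin, hc, List.count_cons, hne2]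

-- Both results as functions of the list of matching lengths.
theorem A_char (combinations : List (List Int)) (liters : Int) :
    num_combinations_fit_min combinations liters
      = match (combinations.filter (fun c => c.sum == liters)).map (fun c => (c.length : Int)) with
        | [] => 0
        | x :: t =>
          if t.foldl min x < x then (( (x :: t).count (t.foldl min x) : Int)) - 1
          else ((x :: t).count x : Int) := by
  unfold num_combinations_fit_min
  rw [foldA_filter]
  set L := (combinations.filter (fun c => c.sum == liters)).map (fun c => (c.length : Int)) with hLdef
  have hL : ∀ y ∈ L, 0 ≤ y := by
    intro y hy
    rw [hLdef] at hy
    obtain ⟨c, _, rfl⟩ := List.mem_map.mp hy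
    positivity
  match L, hL with
  | [], _ => rfl
  | x :: t, hL =>
    have hx : 0 ≤ x := hL x (by simp)
    have ht : ∀ y ∈ t, 0 ≤ y := fun y hy => hL y (by simp [hy])
    have hstep : pvStepA (0, -1) x = (1, x) := by simp [pvStepA]
    rw [List.foldl_cons, hstep, foldA_char t 1 x ht hx]
    have hle := (PySem.List.foldl_min_le t x).1
    by_cases hc : t.foldl min x < x
    · have hne2 : x ≠ t.foldl min x := by omega
      simp [hc, List.count_cons, hne2]
    · have heq2 : t.foldl min x = x := by omega
      simp [hc, heq2, List.count_cons]
      push_cast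
      ring

theorem B_char (combinations : List (List Int)) (liters : Int) :
    num_combinations_fit_min_alt combinations liters
      = match (combinations.filter (fun c => c.sum == liters)).map (fun c => (c.length : Int)) with
        | [] => (0 : Int)
        | x :: t => ((x :: t).count (t.foldl min x) : Int) := by
  unfold num_combinations_fit_min_alt
  match hL : (combinations.filter (fun c => c.sum == liters)).map (fun c => (c.length : Int)) with
  | [] => simp [hL, PySem.List.min?]
  | x :: t => simp [hL, PySem.List.min?_id_cons, PySem.List.count]

theorem num_combinations_fit_min_spec : Claim_unchanged_num_combinations_fit_min := by
  intro combinations liters _ hD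
  rw [D_iff] at hD
  rw [A_char, B_char]
  set L := (combinations.filter (fun c => c.sum == liters)).map (fun c => (c.length : Int)) with hLdef
  match L, hD with
  | [], _ => rfl
  | x :: t, hD =>
    have hnot : ¬ ∃ y ∈ t, y < x := by simpa using hD
    have hge : ∀ y ∈ t, x ≤ y := by
      intro y hy
      by_contra h
      exact hnot ⟨y, hy, by omega⟩
    have : x ≤ t.foldl min x := by
      rcases PySem.List.foldl_min_mem t x with h | h
      · omega
      · exact hge _ h
    have hle := (PySem.List.foldl_min_le t x).1
    have heq2 : t.foldl min x = x := by omega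
    simp [heq2]

theorem num_combinations_fit_min_changed : Claim_changed_num_combinations_fit_min := by
  unfold Claim_changed_num_combinations_fit_min; decide

theorem num_combinations_fit_min_tight : Claim_exact_num_combinations_fit_min := by
  intro combinations liters _ hD
  rw [D_iff] at hD
  rw [A_char, B_char]
  set L := (combinations.filter (fun c => c.sum == liters)).map (fun c => (c.length : Int)) with hLdef
  match L, hD with
  | [], hD => simp at hD
  | x :: t, hD =>
    obtain ⟨y, hy, hylt⟩ := by simpa using hD
    have hmley := (PySem.List.foldl_min_le t x).2 y hy
    have hc : t.foldl min x < x := by omega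
    have hmem : t.foldl min x ∈ x :: t := by
      rcases PySem.List.foldl_min_mem t x with h | h
      · omega
      · exact List.mem_cons_of_mem _ h
    have hcount : 0 < (x :: t).count (t.foldl min x) := List.count_pos_iff.mpr hmem
    simp [hc]
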